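-- pv_equiv track=rewrite | github.com/Lastroboy/M1_MAS_RENNES2 | ProgPY/M1_S1_Python/CC_2022.py | prochain_metro
-- ===== SOURCE A (Python) =====
-- def prochain_metro(passages):
--     d = {}
--     for metro in passages:
--         if (metro["ligne"], metro["destination"]) not in d.keys():
--             d[(metro["ligne"], metro["destination"])] = metro["depart"]
--
--         elif d[(metro["ligne"], metro["destination"])] > metro["depart"]:
--             d[(metro["ligne"], metro["destination"])] = metro["depart"]
--     return d
-- ===== SOURCE B (Python) =====
-- def prochain_metro(passages):
--     groups = {}
--     for metro in passages:
--         groups.setdefault((metro["ligne"], metro["destination"]), []).append(metro["depart"])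
--     return {k: min(v) for k, v in groups.items()}
-- ===== Notes on version B (the rewrite author's own statement) =====
-- stated objective: alternative
-- what changed: Replaced the in-loop membership test and conditional min-update by group-then-reduce: one pass collecting all depart values per (ligne, destination) key, then a dict comprehension taking min of each group.
import Mathlib
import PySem

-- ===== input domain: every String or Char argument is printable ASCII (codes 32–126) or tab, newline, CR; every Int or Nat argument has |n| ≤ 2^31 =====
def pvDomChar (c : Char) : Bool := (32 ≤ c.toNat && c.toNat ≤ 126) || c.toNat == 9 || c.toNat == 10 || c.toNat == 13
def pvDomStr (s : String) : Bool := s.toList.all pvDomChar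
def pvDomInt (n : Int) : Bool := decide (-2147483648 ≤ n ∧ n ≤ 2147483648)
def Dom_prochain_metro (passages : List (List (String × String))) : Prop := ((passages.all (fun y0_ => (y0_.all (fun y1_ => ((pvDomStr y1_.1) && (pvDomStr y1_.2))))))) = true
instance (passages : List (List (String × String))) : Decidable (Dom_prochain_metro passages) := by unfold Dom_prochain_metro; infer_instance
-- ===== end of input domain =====

-- B replaces A's in-loop membership test + conditional min-update by group-then-reduce (collect all departs per key, then min each group); return-value equivalence only.

-- metro["x"]: first-match dict lookup; Pre_ guarantees the key is present, "" is never used inside Pre_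
def pvItem (m : List (String × String)) (key : String) : String :=
  ((PySem.Dict.mk m).get? key).getD ""

-- ===== PORT A =====
def prochain_metro (passages : List (List (String × String))) : List (String × String × String) :=
  (passages.foldl (fun d metro =>
      let k := (pvItem metro "ligne", pvItem metro "destination")
      if !(d.contains k) then d.insert k (pvItem metro "depart")
      else if pvItem metro "depart" < d.getD k "" then d.insert k (pvItem metro "depart")
      else d)
    PySem.Dict.empty).items.map (fun p => (p.1.1, p.1.2, p.2))

-- ===== PORT B =====
def prochain_metro_alt (passages : List (List (String × String))) : List (String × String × String) :=
  let groups := passages.foldl (fun g metro =>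
      g.modify (pvItem metro "ligne", pvItem metro "destination") [] (fun l => l ++ [pvItem metro "depart"]))
    PySem.Dict.empty
  groups.items.map (fun p => (p.1.1, p.1.2, (PySem.List.min? p.2 (fun x => x)).getD ""))

-- ===== PRECONDITION & SPEC =====
-- A (and B) raise KeyError when a metro lacks one of the three keys; exactly those inputs are excluded.
def Pre_prochain_metro (passages : List (List (String × String))) : Prop :=
  (passages.all (fun m => (PySem.Dict.mk m).contains "ligne" && (PySem.Dict.mk m).contains "destination" && (PySem.Dict.mk m).contains "depart")) = true
instance (passages : List (List (String × String))) : Decidable (Pre_prochain_metro passages) := by unfold Pre_prochain_metro; infer_instance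
def pvWitness_prochain_metro : (List (List (String × String))) :=
  [[("ligne", "1"), ("destination", "a"), ("depart", "12")],
   [("ligne", "1"), ("destination", "a"), ("depart", "07")]]
def Spec_prochain_metro (passages : List (List (String × String))) (out : List (String × String × String)) : Prop := out = prochain_metro_alt passages
instance (passages : List (List (String × String))) (out : List (String × String × String)) : Decidable (Spec_prochain_metro passages out) := by unfold Spec_prochain_metro; infer_instance

-- ===== CLAIM (what is proved, stated in full; the proofs are below) =====
def Claim_equal_prochain_metro : Prop := ∀ (passages : List (List (String × String))), Dom_prochain_metro passages → Pre_prochain_metro passages → Spec_prochain_metro passages (prochain_metro passages)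

-- ===== LEMMAS AND PROOFS =====

-- the (ligne, destination) key of one metro
def pvKey (m : List (String × String)) : String × String := (pvItem m "ligne", pvItem m "destination")

-- A's running-minimum step, lifted to Option
def pvStep (o : Option String) (x : String) : Option String :=
  match o with
  | none => some x
  | some v => some (if x < v then x else v)

theorem pvStep_some (v x : String) : pvStep (some v) x = some (min v x) := by
  simp only [pvStep, min_def]
  rcases lt_trichotomy x v with h | h | h
  · simp [h, not_le.mpr h]
  · simp [h]
  · simp [not_lt.mpr (le_of_lt h), le_of_lt h]

theorem foldl_pvStep_some (xs : List String) (v : String) :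
    xs.foldl pvStep (some v) = some (xs.foldl min v) := by
  induction xs generalizing v with
  | nil => rfl
  | cons x t ih => simp [List.foldl_cons, pvStep_some, ih]

-- A's loop body
def pvStepA (d : PySem.Dict (String × String) String) (metro : List (String × String)) :
    PySem.Dict (String × String) String :=
  let k := (pvItem metro "ligne", pvItem metro "destination")
  if !(d.contains k) then d.insert k (pvItem metro "depart")
  else if pvItem metro "depart" < d.getD k "" then d.insert k (pvItem metro "depart")
  else d

theorem get?_pvStepA (d : PySem.Dict (String × String) String) (m : List (String × String))
    (c : String × String) :
    (pvStepA d m).get? c =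
      if c = pvKey m then pvStep (d.get? c) (pvItem m "depart") else d.get? c := by
  simp only [pvStepA, pvKey]
  rcases hg : d.get? (pvItem m "ligne", pvItem m "destination") with _ | v
  · have hc := (PySem.Dict.get?_eq_none_iff_contains d _).mp hg
    rw [hc]
    simp only [Bool.not_false]
    rw [if_pos trivial, PySem.Dict.get?_insert]
    split_ifs with h
    · subst h; rw [hg]; rfl
    · rfl
  · have hc : d.contains (pvItem m "ligne", pvItem m "destination") = true := by
      cases hcc : d.contains (pvItem m "ligne", pvItem m "destination")
      · rw [(PySem.Dict.get?_eq_none_iff_contains d _).mpr hcc] at hg; cases hg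
      · rfl
    rw [hc]
    simp only [Bool.not_true, Bool.false_eq_true, if_false]
    rw [PySem.Dict.getD_eq_get?_getD, hg, Option.getD_some]
    split_ifs with hlt h h
    · subst h; rw [PySem.Dict.get?_insert_self, hg]; simp [pvStep, hlt]
    · exact PySem.Dict.get?_insert_of_ne d _ h
    · subst h; rw [hg]; simp [pvStep, hlt]
    · rfl

theorem keys_pvStepA (d : PySem.Dict (String × String) String) (m : List (String × String)) :
    (pvStepA d m).keys = PySem.Set.add d.keys (pvKey m) := by
  simp only [pvStepA, pvKey]
  cases hc : d.contains (pvItem m "ligne", pvItem m "destination")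
  · have hnm : (pvItem m "ligne", pvItem m "destination") ∉ d.keys := by
      intro h
      rw [(PySem.Dict.contains_iff_mem_keys d _).mpr h] at hc; cases hc
    rw [PySem.Set.add_of_not_mem hnm]
    simp only [Bool.not_false]
    exact PySem.Dict.keys_insert_of_not_contains d _ hc
  · have hmem : (pvItem m "ligne", pvItem m "destination") ∈ d.keys :=
      (PySem.Dict.contains_iff_mem_keys d _).mp hc
    rw [PySem.Set.add_of_mem hmem]
    simp only [Bool.not_true, Bool.false_eq_true, if_false]
    split_ifs with hlt
    · exact PySem.Dict.keys_insert_of_contains d _ hc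
    · rfl

theorem get?_foldl_A (l : List (List (String × String))) (d : PySem.Dict (String × String) String)
    (c : String × String) :
    (l.foldl pvStepA d).get? c =
      ((l.filter (fun m => pvKey m == c)).map (fun m => pvItem m "depart")).foldl pvStep (d.get? c) := by
  induction l generalizing d with
  | nil => rfl
  | cons m t ih =>
    rw [List.foldl_cons, ih, get?_pvStepA]
    by_cases hk : pvKey m = c
    · subst hk
      simp
    · have hb : (pvKey m == c) = false := by simpa using hk
      have hk' : ¬ c = pvKey m := fun h => hk h.symm
      simp [hb, hk']

theorem keys_foldl_A (l : List (List (String × String))) (d : PySem.Dict (String × String) String) :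
    (l.foldl pvStepA d).keys = PySem.Set.update d.keys (l.map pvKey) := by
  induction l generalizing d with
  | nil => rfl
  | cons m t ih =>
    rw [List.foldl_cons, ih, List.map_cons, PySem.Set.update_cons, keys_pvStepA]

-- B's loop body
def pvStepB (g : PySem.Dict (String × String) (List String)) (metro : List (String × String)) :
    PySem.Dict (String × String) (List String) :=
  g.modify (pvItem metro "ligne", pvItem metro "destination") [] (fun l => l ++ [pvItem metro "depart"])

theorem foldl_B_as_pairs (l : List (List (String × String))) (g : PySem.Dict (String × String) (List String)) :
    l.foldl pvStepB g =
      (l.map (fun m => (pvKey m, pvItem m "depart"))).foldl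
        (fun d p => d.modify p.1 [] (fun l => l ++ [p.2])) g := by
  rw [List.foldl_map]; rfl

theorem getD_foldl_B (l : List (List (String × String))) (g : PySem.Dict (String × String) (List String))
    (c : String × String) :
    (l.foldl pvStepB g).getD c [] =
      g.getD c [] ++ (l.filter (fun m => pvKey m == c)).map (fun m => pvItem m "depart") := by
  rw [foldl_B_as_pairs, PySem.Dict.getD_foldl_modify_append]
  congr 1
  rw [List.filter_map, List.map_map]
  simp [Function.comp_def]

theorem keys_foldl_B (l : List (List (String × String))) (g : PySem.Dict (String × String) (List String)) :
    (l.foldl pvStepB g).keys = PySem.Set.update g.keys (l.map pvKey) := by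
  rw [foldl_B_as_pairs, PySem.Dict.keys_foldl_modify_key, List.map_map]
  congr 1

-- ===== VERDICT (by name: the statement is the Claim_ definition above) =====
theorem prochain_metro_spec : Claim_equal_prochain_metro := by
  intro passages _ _
  have key : List.map (fun p => (p.1.1, p.1.2, p.2)) (passages.foldl pvStepA PySem.Dict.empty).items
      = List.map (fun p => (p.1.1, p.1.2, (PySem.List.min? p.2 (fun x => x)).getD ""))
          (passages.foldl pvStepB PySem.Dict.empty).items := by
    set A := passages.foldl pvStepA PySem.Dict.empty with hAdef
    set B := passages.foldl pvStepB PySem.Dict.empty with hBdef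
    have hkA : A.keys = PySem.Set.update [] (passages.map pvKey) := keys_foldl_A _ _
    have hkB : B.keys = PySem.Set.update [] (passages.map pvKey) := keys_foldl_B _ _
    have hndA : A.keys.Nodup := by rw [hkA]; exact PySem.Set.nodup_update _ _ List.nodup_nil
    have hndB : B.keys.Nodup := by rw [hkB]; exact PySem.Set.nodup_update _ _ List.nodup_nil
    rw [PySem.Dict.items_eq_map_keys A hndA "", PySem.Dict.items_eq_map_keys B hndB [],
      List.map_map, List.map_map, hkA, hkB]
    apply List.map_congr_left
    intro c hc
    have hc' : c ∈ passages.map pvKey := by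
      rcases (PySem.Set.mem_update _ _ _).mp hc with h | h
      · simp at h
      · exact h
    rcases List.mem_map.mp hc' with ⟨m, hm, hkm⟩
    have hfil : m ∈ passages.filter (fun m => pvKey m == c) := by
      rw [List.mem_filter]; exact ⟨hm, by simp [hkm]⟩
    rcases hx : (passages.filter (fun m => pvKey m == c)).map (fun m => pvItem m "depart") with _ | ⟨x, xs⟩
    · exfalso
      have hmm : pvItem m "depart" ∈ (passages.filter (fun m => pvKey m == c)).map (fun m => pvItem m "depart") :=
        List.mem_map.mpr ⟨m, hfil, rfl⟩
      rw [hx] at hmm; simp at hmm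
    · have hAval : A.getD c "" = xs.foldl min x := by
        rw [PySem.Dict.getD_eq_get?_getD, hAdef, get?_foldl_A, PySem.Dict.get?_empty, hx]
        simp only [List.foldl_cons, pvStep, foldl_pvStep_some, Option.getD_some]
      have hBval : B.getD c [] = x :: xs := by
        rw [hBdef, getD_foldl_B, PySem.Dict.getD_empty, hx]; rfl
      simp only [Function.comp_apply]
      rw [hAval, hBval, PySem.List.min?_id_cons]
      rfl
  exact key
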